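-- pv_equiv track=rewrite | github.com/adityakamat24/nervx | nervx/perception/lang_csharp.py | _strip_xml_tags
-- ===== SOURCE A (Python) =====
-- def _strip_xml_tags(text: str) -> str:
--     """Remove XML tags from a string, keeping only the text content."""
--     result: list[str] = []
--     i = 0
--     while i < len(text):
--         if text[i] == "<":
--             # Skip until closing >
--             j = text.find(">", i)
--             if j == -1:
--                 break
--             i = j + 1
--         else:
--             result.append(text[i])
--             i += 1
--     return "".join(result)
-- ===== SOURCE B (Python) =====
-- def _strip_xml_tags(text: str) -> str:
--     """Remove XML tags from a string, keeping only the text content."""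
--     first, *rest = text.split("<")
--     out = [first]
--     for part in rest:
--         j = part.find(">")
--         if j != -1:
--             out.append(part[j + 1:])
--     return "".join(out)
-- ===== Notes on version B (the rewrite author's own statement) =====
-- stated objective: faster
-- what changed: Replaces the char-by-char index loop (with explicit find-and-skip state) by one split of the text on '<' and, for each chunk after a '<', keeping only the text after that chunk's first '>' (nothing if the tag never closes); the per-character Python loop becomes a few C-level str operations.
import Mathlib
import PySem

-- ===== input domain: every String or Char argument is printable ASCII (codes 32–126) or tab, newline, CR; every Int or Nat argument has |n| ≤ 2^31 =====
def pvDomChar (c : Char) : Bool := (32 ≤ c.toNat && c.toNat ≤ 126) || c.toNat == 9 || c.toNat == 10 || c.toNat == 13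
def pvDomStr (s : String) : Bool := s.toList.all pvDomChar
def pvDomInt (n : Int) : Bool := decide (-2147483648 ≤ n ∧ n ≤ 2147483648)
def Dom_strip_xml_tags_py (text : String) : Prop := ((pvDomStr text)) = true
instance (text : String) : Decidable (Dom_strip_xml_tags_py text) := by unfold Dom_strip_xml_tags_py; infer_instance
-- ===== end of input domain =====

-- B replaces A's char-by-char index loop (with explicit skip-to-'>' state) by a single
-- split on '<' followed by a per-chunk drop of everything up to the chunk's first '>'
-- (objective: simpler).


-- ===== PORT A =====
-- the while loop over index i, as structural recursion on the remaining suffix text[i:];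
-- 'text.find(">", i)' is PySem.Chars.find on that suffix (result relative to i)
def pvGoA : List Char → List Char
  | [] => []
  | c :: rest =>
    if c = '<' then
      let j := PySem.Chars.find (c :: rest) ['>']
      if j = -1 then []                              -- break: discard the rest
      else pvGoA ((c :: rest).drop (j.toNat + 1))    -- i = j + 1
    else c :: pvGoA rest
termination_by l => l.length
decreasing_by
  · simp only [List.length_drop, List.length_cons]
    omega
  · simp

def strip_xml_tags_py (text : String) : String :=
  String.ofList (pvGoA text.toList)                      -- "".join(result)

-- ===== PORT B =====
-- 'for part in rest: j = part.find(">"); if j != -1: out.append(part[j+1:])'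
def pvJoinB (parts : List (List Char)) : List Char :=
  parts.foldl (fun acc part =>
    let j := PySem.Chars.find part ['>']
    if j = -1 then acc else acc ++ part.drop (j.toNat + 1)) []

def strip_xml_tags_py_alt (text : String) : String :=
  match PySem.Chars.split? text.toList ['<'] with    -- text.split("<"); first, *rest
  | some (first :: rest) => String.ofList (first ++ pvJoinB rest)
  | _ => ""                                          -- unreachable: sep ≠ "" and split is nonempty

-- ===== PRECONDITION & SPEC =====
def Spec_strip_xml_tags_py (text : String) (out : String) : Prop := out = strip_xml_tags_py_alt text
instance (text : String) (out : String) : Decidable (Spec_strip_xml_tags_py text out) := by unfold Spec_strip_xml_tags_py; infer_instance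

-- ===== CLAIM (what is proved, stated in full; the proofs are below) =====
def Claim_equal_strip_xml_tags_py : Prop := ∀ (text : String), Dom_strip_xml_tags_py text → Spec_strip_xml_tags_py text (strip_xml_tags_py text)

-- ===== LEMMAS AND PROOFS =====

-- ---- PySem.Chars.find on a single-character needle ----
lemma find_go_nil (c : Char) (k : Nat) : PySem.Chars.find.go [c] [] k = -1 := by
  simp [PySem.Chars.find.go]

lemma find_go_cons (c x : Char) (t : List Char) (k : Nat) :
    PySem.Chars.find.go [c] (x :: t) k =
      if c = x then (k : Int) else PySem.Chars.find.go [c] t (k+1) := by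
  rw [PySem.Chars.find.go]
  by_cases h : c = x <;> simp [List.isPrefixOf, h, BEq.beq]

lemma find_single_nil (c : Char) : PySem.Chars.find [] [c] = -1 := by
  simp [PySem.Chars.find, find_go_nil]

lemma find_go_shift (c : Char) (cs : List Char) : ∀ k : Nat,
    PySem.Chars.find.go [c] cs k =
      if PySem.Chars.find cs [c] = -1 then -1 else PySem.Chars.find cs [c] + k := by
  induction cs with
  | nil => intro k; simp [find_single_nil, find_go_nil]
  | cons x t ih =>
    intro k
    rw [find_go_cons, show PySem.Chars.find (x :: t) [c] = PySem.Chars.find.go [c] (x::t) 0 from rfl,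
      find_go_cons]
    by_cases h : c = x
    · simp [h]
    · simp only [h, if_false, ih (k+1), ih 1]
      have h0 : (-1 : Int) ≤ PySem.Chars.find t [c] := PySem.Chars.neg_one_le_find t [c]
      split_ifs with h1 <;> push_cast <;> omega

lemma find_single_cons_self (c : Char) (t : List Char) : PySem.Chars.find (c :: t) [c] = 0 := by
  show PySem.Chars.find.go [c] (c::t) 0 = 0
  rw [find_go_cons]; simp

lemma find_single_cons_ne (c x : Char) (t : List Char) (h : c ≠ x) :
    PySem.Chars.find (x :: t) [c] =
      if PySem.Chars.find t [c] = -1 then -1 else PySem.Chars.find t [c] + 1 := by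
  show PySem.Chars.find.go [c] (x::t) 0 = _
  rw [find_go_cons]; simp [h, find_go_shift c t 1]

-- ---- PySem.Chars.splitOn with a single-character separator ----
lemma split_go_nil (c : Char) (fuel : Nat) (cur : List Char) (acc : List (List Char)) :
    PySem.Chars.splitOn.go [c] fuel [] cur acc = (cur.reverse :: acc).reverse := by
  cases fuel <;> rw [PySem.Chars.splitOn.go] <;> simp

lemma split_go_cons_self (c : Char) (fuel : Nat) (rest cur : List Char) (acc : List (List Char)) :
    PySem.Chars.splitOn.go [c] (fuel+1) (c :: rest) cur acc =
      PySem.Chars.splitOn.go [c] fuel rest [] (cur.reverse :: acc) := by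
  rw [PySem.Chars.splitOn.go]
  simp [List.isPrefixOf, BEq.beq]

lemma split_go_cons_ne (c x : Char) (h : c ≠ x) (fuel : Nat) (rest cur : List Char) (acc : List (List Char)) :
    PySem.Chars.splitOn.go [c] (fuel+1) (x :: rest) cur acc =
      PySem.Chars.splitOn.go [c] fuel rest (x :: cur) acc := by
  rw [PySem.Chars.splitOn.go]
  simp [List.isPrefixOf, BEq.beq, h]

lemma split_go_acc (c : Char) : ∀ (fuel : Nat) (l cur : List Char) (acc : List (List Char)),
    l.length ≤ fuel →
    PySem.Chars.splitOn.go [c] fuel l cur acc = acc.reverse ++ PySem.Chars.splitOn.go [c] fuel l cur [] := by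
  intro fuel
  induction fuel with
  | zero =>
    intro l cur acc h
    rw [List.length_eq_zero_iff.mp (Nat.le_zero.mp h)]
    simp [split_go_nil]
  | succ n ih =>
    intro l cur acc h
    match l with
    | [] => simp [split_go_nil]
    | y :: rest =>
      by_cases hy : c = y
      · subst hy
        rw [split_go_cons_self, split_go_cons_self,
          ih rest [] (cur.reverse :: acc) (by simpa using h),
          ih rest [] [cur.reverse] (by simpa using h)]
        simp
      · rw [split_go_cons_ne c y hy, split_go_cons_ne c y hy,
          ih rest (y::cur) acc (by simpa using h)]

lemma splitOn_single_nil (c : Char) : PySem.Chars.splitOn [] [c] = [[]] := by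
  simp [PySem.Chars.splitOn, split_go_nil]

lemma splitOn_single_cons_self (c : Char) (rest : List Char) :
    PySem.Chars.splitOn (c :: rest) [c] = [] :: PySem.Chars.splitOn rest [c] := by
  show PySem.Chars.splitOn.go [c] (rest.length + 1 + 1) (c :: rest) [] [] = _
  rw [split_go_cons_self]
  simp only [List.reverse_nil]
  rw [split_go_acc c _ rest [] [[]] (by simp)]
  rfl

lemma split_go_cur (c : Char) : ∀ (fuel : Nat) (l cur : List Char),
    l.length ≤ fuel →
    PySem.Chars.splitOn.go [c] fuel l cur [] =
      (match PySem.Chars.splitOn.go [c] fuel l [] [] with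
        | [] => [cur.reverse]
        | p :: ps => (cur.reverse ++ p) :: ps) := by
  intro fuel
  induction fuel with
  | zero =>
    intro l cur h
    rw [List.length_eq_zero_iff.mp (Nat.le_zero.mp h)]
    simp [split_go_nil]
  | succ n ih =>
    intro l cur h
    match l with
    | [] => simp [split_go_nil]
    | y :: rest =>
      by_cases hy : c = y
      · subst hy
        rw [split_go_cons_self, split_go_cons_self]
        simp only [List.reverse_nil]
        rw [split_go_acc c n rest [] [cur.reverse] (by simpa using h),
          split_go_acc c n rest [] [[]] (by simpa using h)]
        simp
      · rw [split_go_cons_ne c y hy, split_go_cons_ne c y hy,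
          ih rest (y :: cur) (by simpa using h), ih rest [y] (by simpa using h)]
        cases hb : PySem.Chars.splitOn.go [c] n rest [] [] <;> simp

lemma splitOn_single_cons_ne (c x : Char) (h : c ≠ x) (rest : List Char) :
    PySem.Chars.splitOn (x :: rest) [c] =
      (match PySem.Chars.splitOn rest [c] with
        | [] => [[x]]
        | p :: ps => (x :: p) :: ps) := by
  show PySem.Chars.splitOn.go [c] (rest.length + 1 + 1) (x :: rest) [] [] = _
  rw [split_go_cons_ne c x h, split_go_cur c (rest.length+1) rest [x] (by simp)]
  show _ = (match PySem.Chars.splitOn.go [c] (rest.length+1) rest [] [] with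
        | [] => [[x]] | p :: ps => (x :: p) :: ps)
  cases hb : PySem.Chars.splitOn.go [c] (rest.length+1) rest [] [] <;> simp

lemma splitOn_ne_nil (c : Char) (l : List Char) : PySem.Chars.splitOn l [c] ≠ [] := by
  induction l with
  | nil => simp [splitOn_single_nil]
  | cons y rest ih =>
    by_cases hy : c = y
    · subst hy; simp [splitOn_single_cons_self]
    · rw [splitOn_single_cons_ne c y hy]
      cases hb : PySem.Chars.splitOn rest [c] <;> simp

-- ---- B's per-chunk action, and the foldl as a flatMap ----
def pvF (part : List Char) : List Char :=
  if PySem.Chars.find part ['>'] = -1 then []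
  else part.drop ((PySem.Chars.find part ['>']).toNat + 1)

lemma pvJoinB_acc : ∀ (parts : List (List Char)) (acc : List Char),
    parts.foldl (fun acc part =>
      let j := PySem.Chars.find part ['>']
      if j = -1 then acc else acc ++ part.drop (j.toNat + 1)) acc = acc ++ parts.flatMap pvF := by
  intro parts
  induction parts with
  | nil => simp
  | cons p ps ih =>
    intro acc
    simp only [List.foldl_cons, List.flatMap_cons, ih, pvF]
    split_ifs with h <;> simp

-- B's value as a function of splitOn (the reachable branch)
def pvB (cs : List Char) : List Char :=
  match PySem.Chars.splitOn cs ['<'] with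
  | p :: ps => p ++ ps.flatMap pvF
  | [] => []

lemma pvF_nil : pvF [] = [] := by simp [pvF, find_single_nil]

lemma pvF_cons_ne (x : Char) (p : List Char) (hx : x ≠ '>') : pvF (x :: p) = pvF p := by
  simp only [pvF, find_single_cons_ne '>' x p (Ne.symm hx)]
  by_cases h : PySem.Chars.find p ['>'] = -1
  · simp [h]
  · have h0 : (0:Int) ≤ PySem.Chars.find p ['>'] := by
      have := PySem.Chars.neg_one_le_find p ['>']
      omega
    have h1 : (PySem.Chars.find p ['>'] + 1).toNat + 1 = (PySem.Chars.find p ['>']).toNat + 1 + 1 := by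
      omega
    have hne : ¬ (PySem.Chars.find p ['>'] + 1 = -1) := by omega
    simp [h, hne, h1, List.drop_succ_cons]

-- the joint induction: A's loop equals B outside a tag (pvGoA = pvB) and inside a tag
-- (skip-to-'>' equals the flatMap over the remaining '<'-chunks)
lemma pvMain : ∀ n : Nat,
    (∀ cs : List Char, cs.length ≤ n → pvGoA cs = pvB cs) ∧
    (∀ rest : List Char, rest.length ≤ n →
      (if PySem.Chars.find rest ['>'] = -1 then []
       else pvGoA (rest.drop ((PySem.Chars.find rest ['>']).toNat + 1)))
        = (PySem.Chars.splitOn rest ['<']).flatMap pvF) := by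
  intro n
  induction n with
  | zero =>
    constructor
    · intro cs h
      rw [List.length_eq_zero_iff.mp (Nat.le_zero.mp h)]
      simp [pvGoA, pvB, splitOn_single_nil]
    · intro rest h
      rw [List.length_eq_zero_iff.mp (Nat.le_zero.mp h)]
      simp [find_single_nil, splitOn_single_nil, pvF_nil]
  | succ n ih =>
    obtain ⟨ihM, ihT⟩ := ih
    constructor
    · -- pvGoA = pvB
      intro cs h
      match cs with
      | [] => simp [pvGoA, pvB, splitOn_single_nil]
      | c :: rest =>
        have hr : rest.length ≤ n := by simpa using h
        by_cases hc : c = '<'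
        · subst hc
          rw [pvGoA]
          rw [find_single_cons_ne '>' '<' rest (by decide)]
          have hB : pvB ('<' :: rest) = (PySem.Chars.splitOn rest ['<']).flatMap pvF := by
            simp [pvB, splitOn_single_cons_self]
          by_cases hf : PySem.Chars.find rest ['>'] = -1
          · rw [hB, ← ihT rest hr]
            simp [hf]
          · have h0 : (0:Int) ≤ PySem.Chars.find rest ['>'] := by
              have := PySem.Chars.neg_one_le_find rest ['>']
              omega
            have hd : ((PySem.Chars.find rest ['>'] + 1).toNat + 1)
                = ((PySem.Chars.find rest ['>']).toNat + 1) + 1 := by omega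
            have hne : ¬ (PySem.Chars.find rest ['>'] + 1 = -1) := by omega
            rw [hB, ← ihT rest hr]
            simp [hf, hne, hd, List.drop_succ_cons]
        · rw [pvGoA]
          simp only [if_neg hc]
          rw [ihM rest hr]
          have hne : ('<' : Char) ≠ c := fun hh => hc hh.symm
          simp only [pvB, splitOn_single_cons_ne '<' c hne rest]
          cases hb : PySem.Chars.splitOn rest ['<'] with
          | nil => exact absurd hb (splitOn_ne_nil '<' rest)
          | cons p ps => simp
    · -- in-tag lemma
      intro rest h
      match rest with
      | [] => simp [find_single_nil, splitOn_single_nil, pvF_nil]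
      | y :: r =>
        have hr : r.length ≤ n := by simpa using h
        by_cases hy : y = '>'
        · subst hy
          rw [find_single_cons_self]
          simp only [show ¬((0:Int) = -1) by decide, if_false, Int.toNat_zero,
            List.drop_succ_cons, List.drop_zero]
          rw [ihM r hr]
          rw [splitOn_single_cons_ne '<' '>' (by decide) r]
          cases hb : PySem.Chars.splitOn r ['<'] with
          | nil => exact absurd hb (splitOn_ne_nil '<' r)
          | cons p ps =>
            have hfp : pvF ('>' :: p) = p := by
              simp [pvF, find_single_cons_self]
            simp [List.flatMap_cons, hfp, pvB, hb]
        · -- y ≠ '>': the head char is skipped by A's find and dropped by B's per-chunk find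
          rw [find_single_cons_ne '>' y r (fun hh => hy hh.symm)]
          by_cases hf : PySem.Chars.find r ['>'] = -1
          · simp only [hf, if_pos]
            -- LHS = []; RHS: reduce through the chunk structure
            by_cases hyl : y = '<'
            · subst hyl
              rw [splitOn_single_cons_self]
              simp only [List.flatMap_cons, pvF_nil, List.nil_append]
              rw [← ihT r hr]
              simp [hf]
            · rw [splitOn_single_cons_ne '<' y (fun hh => hyl hh.symm) r]
              cases hb : PySem.Chars.splitOn r ['<'] with
              | nil => exact absurd hb (splitOn_ne_nil '<' r)
              | cons p ps =>
                simp only [List.flatMap_cons]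
                rw [pvF_cons_ne y p hy]
                have := ihT r hr
                rw [hb] at this
                simp only [hf, List.flatMap_cons] at this
                exact this
          · have h0 : (0:Int) ≤ PySem.Chars.find r ['>'] := by
              have := PySem.Chars.neg_one_le_find r ['>']
              omega
            have hd : ((PySem.Chars.find r ['>'] + 1).toNat + 1)
                = ((PySem.Chars.find r ['>']).toNat + 1) + 1 := by omega
            have hne : ¬ (PySem.Chars.find r ['>'] + 1 = -1) := by omega
            simp only [hf, if_false, hne, hd, List.drop_succ_cons]
            by_cases hyl : y = '<'
            · subst hyl
              rw [splitOn_single_cons_self]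
              simp only [List.flatMap_cons, pvF_nil, List.nil_append]
              rw [← ihT r hr]
              simp [hf]
            · rw [splitOn_single_cons_ne '<' y (fun hh => hyl hh.symm) r]
              cases hb : PySem.Chars.splitOn r ['<'] with
              | nil => exact absurd hb (splitOn_ne_nil '<' r)
              | cons p ps =>
                simp only [List.flatMap_cons]
                rw [pvF_cons_ne y p hy]
                have := ihT r hr
                rw [hb] at this
                simp only [hf, if_false, List.flatMap_cons] at this
                exact this

-- ===== VERDICT (by name: the statement is the Claim_ definition above) =====
theorem strip_xml_tags_py_spec : Claim_equal_strip_xml_tags_py := by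
  intro text _
  show strip_xml_tags_py text = strip_xml_tags_py_alt text
  unfold strip_xml_tags_py strip_xml_tags_py_alt
  rw [show PySem.Chars.split? text.toList ['<']
      = some (PySem.Chars.splitOn text.toList ['<']) by simp [PySem.Chars.split?]]
  cases hb : PySem.Chars.splitOn text.toList ['<'] with
  | nil => exact absurd hb (splitOn_ne_nil '<' text.toList)
  | cons p ps =>
    simp only
    rw [(pvMain text.toList.length).1 text.toList le_rfl]
    simp [pvB, hb, pvJoinB, pvJoinB_acc]
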